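-- pv_equiv track=rewrite | github.com/zelo78/euler | problems_851_900/problem_872/solution872.py | dfs
-- ===== SOURCE A (Python) =====
-- def dfs(node: int, target: int, shift: int) -> int:
--     if node < target or (target - node) % shift != 0:
--         return 0
--     if node == target:
--         return node
--
--     child = node - shift
--     while child >= target:
--         result = dfs(node=child, target=target, shift=2 * shift)
--         if result:
--             return node + result
--         child -= shift
--         shift *= 2
--
--     raise RuntimeError
-- ===== SOURCE B (Python) =====
-- def dfs(node: int, target: int, shift: int) -> int:
--     if node < target or (target - node) % shift != 0:
--         return 0
--     total = 0
--     while True: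
--         total += node
--         if node == target:
--             return total
--         p = 1
--         while True:
--             child = node - p * shift
--             if child < target:
--                 raise RuntimeError
--             if (target - child) % (2 * p * shift) == 0:
--                 node = child
--                 shift = 2 * p * shift
--                 break
--             p *= 2
-- ===== Notes on version B (the rewrite author's own statement) =====
-- stated objective: alternative
-- what changed: Replaced A's recursive backtracking (each candidate child explored by a recursive call whose truthiness signals success) by a flat iterative accumulator loop that walks the unique path, selecting the next child directly by the divisibility test (target-child) % (2*p*shift) == 0 instead of recursing to find out.
-- outside the precondition, e.g. on dfs(1, -1, 1): A returns 0, B returns 0; on dfs(2, 0, 1): A raises RuntimeError, B returns 2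
import Mathlib
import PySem

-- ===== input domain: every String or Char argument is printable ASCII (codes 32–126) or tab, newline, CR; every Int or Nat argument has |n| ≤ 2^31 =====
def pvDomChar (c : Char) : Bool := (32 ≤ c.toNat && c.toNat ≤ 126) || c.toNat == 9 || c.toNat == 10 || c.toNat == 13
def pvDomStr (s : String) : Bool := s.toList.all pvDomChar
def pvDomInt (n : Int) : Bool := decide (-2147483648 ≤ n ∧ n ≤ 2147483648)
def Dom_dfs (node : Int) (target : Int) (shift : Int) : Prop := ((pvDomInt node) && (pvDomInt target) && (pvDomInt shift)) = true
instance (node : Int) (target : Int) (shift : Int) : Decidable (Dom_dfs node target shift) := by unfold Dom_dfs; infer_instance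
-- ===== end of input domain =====

-- B replaces A's recursive backtracking (truthiness of a recursive call signals success) by a flat
-- iterative accumulator loop that picks each next child directly by a divisibility test (objective:
-- alternative decomposition, same cost).
-- Both Python functions can recurse/loop without bound (shift < 0) — the ports use a fuel parameter
-- (64, proven sufficient on Pre_ within Dom); outside Pre_ the fuel-exhausted value is junk.

-- ===== PORT A =====
-- A: dfs(node,target,shift): guard returns 0; node==target returns node; else while child>=target:
-- recurse on (child, 2*shift); nonzero result means found; RuntimeError (junk 0, outside Pre_) otherwise.
mutual
def dfsAF : Nat → Int → Int → Int → Int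
  | 0, _, _, _ => 0   -- fuel exhausted: unreachable inside Pre_
  | f+1, node, target, shift =>
    if node < target ∨ PySem.Int.mod (target - node) shift ≠ 0 then 0
    else if node = target then node
    else dfsALoop f (f+1) node target (node - shift) shift
  termination_by f _ _ _ => (f, 0)
def dfsALoop : Nat → Nat → Int → Int → Int → Int → Int
  | _, 0, _, _, _, _ => 0   -- loop fuel exhausted: unreachable inside Pre_
  | f, l+1, node, target, child, shift =>
    if child ≥ target then
      if dfsAF f child target (2 * shift) ≠ 0 then node + dfsAF f child target (2 * shift)
      else dfsALoop f l node target (child - shift) (2 * shift)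
    else 0   -- raise RuntimeError: outside Pre_, junk value
  termination_by f l _ _ _ _ => (f, l + 1)
end

def dfs (node : Int) (target : Int) (shift : Int) : Int := dfsAF 64 node target shift

-- ===== PORT B =====
-- B's inner scan: p = 1, 2, 4, …; returns (new node, new shift) at the first divisible child,
-- none on child < target (RuntimeError) or fuel exhaustion.
def dfsBScan : Nat → Int → Int → Int → Int → Option (Int × Int)
  | 0, _, _, _, _ => none
  | f+1, node, target, shift, p =>
    let child := node - p * shift
    if child < target then none
    else if PySem.Int.mod (target - child) (2 * p * shift) = 0 then some (child, 2 * p * shift)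
    else dfsBScan f node target shift (2 * p)

-- B's outer loop: total += node; return total at target; else step to the scanned child.
def dfsBF : Nat → Int → Int → Int → Int → Int
  | 0, _, _, _, _ => 0   -- fuel exhausted: unreachable inside Pre_
  | f+1, total, node, target, shift =>
    if node = target then total + node
    else match dfsBScan 64 node target shift 1 with
      | none => 0   -- raise RuntimeError: outside Pre_, junk value
      | some (n', s') => dfsBF f (total + node) n' target s'

def dfs_alt (node : Int) (target : Int) (shift : Int) : Int :=
  if node < target ∨ PySem.Int.mod (target - node) shift ≠ 0 then 0
  else dfsBF 64 0 node target shift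

-- ===== PRECONDITION & SPEC =====
-- Pre_ excludes: shift = 0 with node ≥ target (ZeroDivisionError); shift < 0 on the divisible
-- descending branch (A never returns: it loops forever); and target ≤ 0 on the divisible descending
-- branch, because there A's truthiness test makes it raise RuntimeError whenever a partial path-sum
-- is 0 — a condition with no closed form; where A does return there, B returns the same value.
def Pre_dfs (node : Int) (target : Int) (shift : Int) : Prop :=
  node < target ∨
  (shift ≠ 0 ∧ PySem.Int.mod (target - node) shift ≠ 0) ∨
  (shift ≠ 0 ∧ node = target) ∨
  (1 ≤ shift ∧ 1 ≤ target ∧ target < node ∧ PySem.Int.mod (target - node) shift = 0)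
instance (node : Int) (target : Int) (shift : Int) : Decidable (Pre_dfs node target shift) := by
  unfold Pre_dfs; infer_instance

def pvWitness_dfs : Int × Int × Int := (11, 1, 2)

def Spec_dfs (node : Int) (target : Int) (shift : Int) (out : Int) : Prop := out = dfs_alt node target shift
instance (node : Int) (target : Int) (shift : Int) (out : Int) : Decidable (Spec_dfs node target shift out) := by unfold Spec_dfs; infer_instance

-- ===== CLAIM (what is proved, stated in full; the proofs are below) =====
def Claim_equal_dfs : Prop := ∀ (node : Int) (target : Int) (shift : Int), Dom_dfs node target shift → Pre_dfs node target shift → Spec_dfs node target shift (dfs node target shift)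

-- ===== LEMMAS AND PROOFS =====

-- 2-adic valuation of a natural number (proof helper).
def v2 (n : Nat) : Nat :=
  if h : n ≠ 0 ∧ n % 2 = 0 then v2 (n / 2) + 1 else 0
termination_by n
decreasing_by exact Nat.div_lt_self (Nat.pos_of_ne_zero h.1) one_lt_two

theorem v2_spec : ∀ n : Nat, n ≠ 0 → ∃ m, n = 2 ^ v2 n * m ∧ m % 2 = 1 := by
  intro n
  induction n using Nat.strong_induction_on with
  | _ n ih =>
    intro hn
    rw [v2]
    by_cases h : n ≠ 0 ∧ n % 2 = 0
    · rw [dif_pos h]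
      have hhalf : n / 2 ≠ 0 := by omega
      obtain ⟨m, hm, hodd⟩ := ih (n / 2) (by omega) hhalf
      refine ⟨m, ?_, hodd⟩
      calc n = 2 * (n / 2) := by omega
        _ = 2 * (2 ^ v2 (n / 2) * m) := by rw [← hm]
        _ = 2 ^ (v2 (n / 2) + 1) * m := by ring
    · rw [dif_neg h]
      exact ⟨n, by simp, by omega⟩

theorem v2_le {m : Nat} (hm : m ≠ 0) : 2 ^ v2 m ≤ m := by
  obtain ⟨o, ho, hodd⟩ := v2_spec m hm
  have h1 : 1 ≤ o := by omega
  calc 2 ^ v2 m = 2 ^ v2 m * 1 := by ring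
    _ ≤ 2 ^ v2 m * o := Nat.mul_le_mul_left _ h1
    _ = m := ho.symm

-- the unique candidate: 2^(v+1) divides m - 2^v …
theorem v2_sub_dvd {m : Nat} (hm : m ≠ 0) : 2 ^ (v2 m + 1) ∣ (m - 2 ^ v2 m) := by
  obtain ⟨o, ho, hodd⟩ := v2_spec m hm
  obtain ⟨t, ht⟩ : 2 ∣ (o - 1) := by omega
  refine ⟨t, ?_⟩
  have h1 : 1 ≤ o := by omega
  calc m - 2 ^ v2 m = 2 ^ v2 m * o - 2 ^ v2 m * 1 := by rw [← ho]; ring_nf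
    _ = 2 ^ v2 m * (o - 1) := by rw [Nat.mul_sub]
    _ = 2 ^ v2 m * (2 * t) := by rw [← ht]
    _ = 2 ^ (v2 m + 1) * t := by ring

-- … and fails for every i < v.
theorem v2_not_dvd {m : Nat} (hm : m ≠ 0) {i : Nat} (hi : i < v2 m) :
    ¬ ((2:Int) ^ (i + 1) ∣ ((m:Int) - 2 ^ i)) := by
  intro hdvd
  obtain ⟨o, ho, _⟩ := v2_spec m hm
  have hdm : (2:Int) ^ (i + 1) ∣ (m:Int) := by
    have : (2:Nat) ^ (i + 1) ∣ m := dvd_trans (pow_dvd_pow 2 (by omega)) ⟨o, ho⟩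
    exact_mod_cast Int.natCast_dvd_natCast.mpr this
  have h2 : (2:Int) ^ (i + 1) ∣ (2:Int) ^ i := by
    have := dvd_sub hdm hdvd
    simpa using this
  have hle : (2:Int) ^ (i + 1) ≤ 2 ^ i := Int.le_of_dvd (by positivity) h2
  have hlt : (2:Int) ^ i < 2 ^ (i + 1) := by
    have h3 : (2:Int) ^ (i+1) = 2 ^ i * 2 := by rw [pow_succ]
    nlinarith [pow_pos (show (0:Int) < 2 by norm_num) i]
  omega

-- the canonical child quotient
def mchild (m : Nat) : Nat := (m - 2 ^ v2 m) / 2 ^ (v2 m + 1)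

theorem mchild_mul {m : Nat} (hm : m ≠ 0) : mchild m * 2 ^ (v2 m + 1) + 2 ^ v2 m = m := by
  have h1 : mchild m * 2 ^ (v2 m + 1) = m - 2 ^ v2 m := Nat.div_mul_cancel (v2_sub_dvd hm)
  have h2 := v2_le hm
  omega

theorem mchild_lt {m : Nat} (hm : m ≠ 0) : mchild m < m := by
  have h1 := mchild_mul hm
  have h3 : 1 ≤ 2 ^ v2 m := Nat.one_le_two_pow
  have h6 : mchild m ≤ mchild m * 2 ^ (v2 m + 1) :=
    Nat.le_mul_of_pos_right _ (by positivity)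
  omega

theorem mchild_bound {m k : Nat} (hm : m ≠ 0) (hk : m < 2 ^ (k + 1)) : mchild m < 2 ^ k := by
  have h1 := mchild_mul hm
  have h3 : 1 ≤ 2 ^ v2 m := Nat.one_le_two_pow
  have h5 : 2 ^ (k + 1) = 2 ^ k * 2 := by rw [pow_succ]
  have h7 : mchild m * 2 ≤ mchild m * 2 ^ (v2 m + 1) :=
    Nat.mul_le_mul_left _ (by
      calc 2 = 2 ^ 1 := rfl
        _ ≤ 2 ^ (v2 m + 1) := Nat.pow_le_pow_right (by norm_num) (by omega))
  omega

theorem mchild_cast {m : Nat} (hm : m ≠ 0) :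
    ((mchild m : Int)) * 2 ^ (v2 m + 1) + 2 ^ v2 m = (m:Int) := by
  exact_mod_cast congrArg (fun n : Nat => (n : Int)) (mchild_mul hm)

-- invariant transfer to the child
theorem child_inv {node target s : Int} {m : Nat} (hm : m ≠ 0)
    (hnt : node - target = (m:Int) * s) :
    (node - 2 ^ v2 m * s) - target = ((mchild m : Int)) * (2 ^ (v2 m + 1) * s) := by
  have hcast := mchild_cast hm
  linear_combination hnt - s * hcast

-- the mod test on candidate i, as divisibility of m - 2^i
theorem cand_mod {node target s : Int} {m : Nat} (hnt : node - target = (m:Int) * s)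
    (hs : s ≠ 0) (i : Nat) {D : Int} (hD : D = 2 ^ (i + 1) * s) :
    (PySem.Int.mod (target - (node - 2 ^ i * s)) D = 0) ↔ ((2:Int) ^ (i + 1) ∣ ((m:Int) - 2 ^ i)) := by
  rw [PySem.Int.mod_eq_zero_iff_dvd, hD]
  have he : target - (node - 2 ^ i * s) = -((((m:Int) - 2 ^ i)) * s) := by
    linear_combination -hnt
  rw [he, dvd_neg]
  exact mul_dvd_mul_iff_right hs

-- the divisibility at i = v, Int version
theorem v2_dvd_int {m : Nat} (hm : m ≠ 0) :
    (2:Int) ^ (v2 m + 1) ∣ ((m:Int) - 2 ^ v2 m) := by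
  refine ⟨(mchild m : Int), ?_⟩
  linear_combination -(mchild_cast hm)

-- specification path sum, by well-founded recursion on the gap
def specV (node target s : Int) : Int :=
  if h : node ≤ target ∨ s < 1 then node
  else
    let v := v2 ((node - target).toNat / s.toNat)
    node + specV (node - 2 ^ v * s) target (2 ^ (v + 1) * s)
termination_by (node - target).toNat
decreasing_by
  rw [not_or, not_le, not_lt] at h
  have h1 : (1:Int) ≤ 2 ^ v2 ((node - target).toNat / s.toNat) := one_le_pow₀ (by norm_num)
  have h2 : (1:Int) ≤ 2 ^ v2 ((node - target).toNat / s.toNat) * s := by nlinarith [h.2]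
  omega

theorem specV_of_le {node target s : Int} (h : node ≤ target) : specV node target s = node := by
  rw [specV.eq_def, dif_pos (Or.inl h)]

-- the quotient v2 argument evaluates to m under the invariant
theorem quot_eq {node target s : Int} {m : Nat} (hnt : node - target = (m:Int) * s)
    (hs : 1 ≤ s) : (node - target).toNat / s.toNat = m := by
  have hs0 : (0:Int) ≤ s := by omega
  have h1 : node - target = ((m * s.toNat : Nat) : Int) := by
    push_cast [Int.toNat_of_nonneg hs0]; exact hnt
  rw [h1]
  simp only [Int.toNat_natCast]
  exact Nat.mul_div_cancel m (by omega : 0 < s.toNat)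

theorem specV_step {node target s : Int} {m : Nat} (hm : m ≠ 0)
    (hnt : node - target = (m:Int) * s) (hs : 1 ≤ s) :
    specV node target s = node + specV (node - 2 ^ v2 m * s) target (2 ^ (v2 m + 1) * s) := by
  have hm1 : (1:Int) ≤ (m:Int) := by exact_mod_cast Nat.one_le_iff_ne_zero.mpr hm
  have hgt : target < node := by nlinarith
  rw [specV.eq_def]
  rw [dif_neg (by rw [not_or, not_le, not_lt]; exact ⟨by omega, by omega⟩)]
  rw [quot_eq hnt hs]

theorem specV_pos : ∀ m : Nat, ∀ node target s : Int, node - target = (m:Int) * s →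
    1 ≤ target → 1 ≤ s → 1 ≤ specV node target s := by
  intro m
  induction m using Nat.strong_induction_on with
  | _ m ih =>
    intro node target s hnt ht hs
    by_cases hm : m = 0
    · subst hm
      have he : node = target := by have := hnt; simp at this; omega
      rw [he, specV_of_le le_rfl]; omega
    · rw [specV_step hm hnt hs]
      have hm1 : (1:Int) ≤ (m:Int) := by exact_mod_cast Nat.one_le_iff_ne_zero.mpr hm
      have hgt : target < node := by nlinarith
      have hs' : (1:Int) ≤ 2 ^ (v2 m + 1) * s := by
        have : (1:Int) ≤ 2 ^ (v2 m + 1) := one_le_pow₀ (by norm_num)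
        nlinarith
      have := ih (mchild m) (mchild_lt hm) _ target _ (child_inv hm hnt) ht hs'
      omega

-- A's while-loop walks the candidates i = 0, 1, …, v; candidates before v fail the child's guard.
theorem loopA (target s0 node R : Int) (m : Nat)
    (hnt : node - target = (m:Int) * s0) (hs : 1 ≤ s0) (hm : m ≠ 0) :
    ∀ j i g l, i + j = v2 m → v2 m < i + l → 1 ≤ g →
    dfsAF g (node - 2 ^ v2 m * s0) target (2 * (2 ^ v2 m * s0)) = R → R ≠ 0 →
    dfsALoop g l node target (node - 2 ^ i * s0) (2 ^ i * s0) = node + R := by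
  intro j
  induction j with
  | zero =>
    intro i g l hij hil hg hrec hR
    have hi : i = v2 m := by omega
    subst hi
    obtain ⟨l', rfl⟩ : ∃ l', l = l' + 1 := ⟨l - 1, by omega⟩
    have hpow : (2:Nat) ^ v2 m ≤ m := v2_le hm
    have hpi : (2:Int) ^ v2 m ≤ (m:Int) := by exact_mod_cast hpow
    have hge : node - 2 ^ v2 m * s0 ≥ target := by nlinarith
    simp only [dfsALoop]
    rw [if_pos hge, hrec, if_pos hR]
  | succ j ihj =>
    intro i g l hij hil hg hrec hR
    have hiv : i < v2 m := by omega
    obtain ⟨l', rfl⟩ : ∃ l', l = l' + 1 := ⟨l - 1, by omega⟩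
    have hpow : (2:Nat) ^ i ≤ m :=
      le_trans (Nat.pow_le_pow_right (by norm_num) (by omega)) (v2_le hm)
    have hpi : (2:Int) ^ i ≤ (m:Int) := by exact_mod_cast hpow
    have hge : node - 2 ^ i * s0 ≥ target := by nlinarith
    have hzero : dfsAF g (node - 2 ^ i * s0) target (2 * (2 ^ i * s0)) = 0 := by
      obtain ⟨g', rfl⟩ : ∃ g', g = g' + 1 := ⟨g - 1, by omega⟩
      have hmod : PySem.Int.mod (target - (node - 2 ^ i * s0)) (2 * (2 ^ i * s0)) ≠ 0 := by
        rw [ne_eq, cand_mod hnt (by omega) i (show (2:Int) * (2 ^ i * s0) = 2 ^ (i + 1) * s0 by ring)]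
        exact v2_not_dvd hm hiv
      simp only [dfsAF]
      rw [if_pos (Or.inr hmod)]
    simp only [dfsALoop]
    rw [if_pos hge, hzero, if_neg (by simp : ¬((0:Int) ≠ 0))]
    have e1 : node - 2 ^ i * s0 - 2 ^ i * s0 = node - 2 ^ (i + 1) * s0 := by ring
    have e2 : 2 * ((2:Int) ^ i * s0) = 2 ^ (i + 1) * s0 := by ring
    rw [e1, e2]
    exact ihj (i + 1) g l' (by omega) (by omega) hg hrec hR

theorem dfsAF_at_target (f : Nat) (target s : Int) : dfsAF (f + 1) target target s = target := by
  simp only [dfsAF]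
  rw [if_neg (by
    rintro (h | h)
    · exact lt_irrefl _ h
    · exact h (by
        have : target - target = 0 := by ring
        rw [this]
        exact (PySem.Int.mod_eq_zero_iff_dvd 0 s).mpr (dvd_zero s)))]
  simp

theorem dfsAF_eq : ∀ k f (node target s : Int), k + 2 ≤ f → 1 ≤ target → 1 ≤ s →
    target ≤ node → s ∣ (node - target) → node - target < 2 ^ k * s →
    dfsAF f node target s = specV node target s := by
  intro k
  induction k with
  | zero =>
    intro f node target s h2 ht hs hge hdvd hb
    obtain ⟨q, hq⟩ := hdvd
    have hq0 : q = 0 := by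
      by_contra hne
      rcases lt_or_gt_of_ne hne with hlt | hgt
      · nlinarith
      · nlinarith [hb, hq, hs]
    rw [hq0, mul_zero] at hq
    have he : node = target := by omega
    subst he
    obtain ⟨f', rfl⟩ : ∃ f', f = f' + 1 := ⟨f - 1, by omega⟩
    rw [dfsAF_at_target, specV_of_le le_rfl]
  | succ k ihk =>
    intro f node target s h2 ht hs hge hdvd hb
    by_cases he : node = target
    · subst he
      obtain ⟨f', rfl⟩ : ∃ f', f = f' + 1 := ⟨f - 1, by omega⟩
      rw [dfsAF_at_target, specV_of_le le_rfl]
    · have hlt : target < node := lt_of_le_of_ne hge (Ne.symm he)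
      obtain ⟨q, hq⟩ := hdvd
      have hq1 : 1 ≤ q := by nlinarith
      have hnt : node - target = (q.toNat : Int) * s := by
        rw [Int.toNat_of_nonneg (by omega : (0:Int) ≤ q)]; linarith [hq]
      have hm : q.toNat ≠ 0 := by omega
      have hmb : q.toNat < 2 ^ (k + 1) := by
        have hbp : ((2:Int)) ^ (k + 1) = ((2 ^ (k + 1) : Nat) : Int) := by push_cast; ring
        have hqs : q * s < 2 ^ (k + 1) * s := by linarith [hq, hb]
        have hqlt : q < 2 ^ (k + 1) := lt_of_mul_lt_mul_right hqs (by omega)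
        omega
      have hv : v2 q.toNat < k + 1 := by
        have h1 := v2_le hm
        have h2' : 2 ^ v2 q.toNat < 2 ^ (k + 1) := lt_of_le_of_lt h1 hmb
        exact (Nat.pow_lt_pow_iff_right (by norm_num)).mp h2'
      have hcnt := child_inv hm hnt
      have hone : (1:Int) ≤ 2 ^ (v2 q.toNat + 1) := one_le_pow₀ (by norm_num)
      have hs' : (1:Int) ≤ 2 ^ (v2 q.toNat + 1) * s := by nlinarith
      have hmc0 : (0:Int) ≤ (mchild q.toNat : Int) := Int.natCast_nonneg _
      have hge' : target ≤ node - 2 ^ v2 q.toNat * s := by nlinarith [hcnt]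
      have hdvd' : (2 ^ (v2 q.toNat + 1) * s) ∣ (node - 2 ^ v2 q.toNat * s - target) :=
        ⟨(mchild q.toNat : Int), by rw [hcnt]; ring⟩
      have hb' : node - 2 ^ v2 q.toNat * s - target < 2 ^ k * (2 ^ (v2 q.toNat + 1) * s) := by
        have h1 := mchild_bound hm hmb
        have hcast : ((mchild q.toNat : Int)) < 2 ^ k := by exact_mod_cast h1
        rw [hcnt]
        nlinarith
      have hrec : dfsAF (f - 1) (node - 2 ^ v2 q.toNat * s) target (2 ^ (v2 q.toNat + 1) * s)
          = specV (node - 2 ^ v2 q.toNat * s) target (2 ^ (v2 q.toNat + 1) * s) :=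
        ihk (f - 1) _ target _ (by omega) ht hs' hge' hdvd' hb'
      have hRpos : 1 ≤ specV (node - 2 ^ v2 q.toNat * s) target (2 ^ (v2 q.toNat + 1) * s) :=
        specV_pos (mchild q.toNat) _ target _ hcnt ht hs'
      obtain ⟨f', rfl⟩ : ∃ f', f = f' + 1 := ⟨f - 1, by omega⟩
      have hguard : ¬(node < target ∨ PySem.Int.mod (target - node) s ≠ 0) := by
        rintro (h | h)
        · exact absurd h (by omega)
        · exact h ((PySem.Int.mod_eq_zero_iff_dvd _ _).mpr ⟨-q, by rw [mul_neg]; linarith [hq]⟩)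
      simp only [dfsAF]
      rw [if_neg hguard, if_neg he]
      have hrec2 : dfsAF f' (node - 2 ^ v2 q.toNat * s) target (2 * (2 ^ v2 q.toNat * s))
          = specV (node - 2 ^ v2 q.toNat * s) target (2 ^ (v2 q.toNat + 1) * s) := by
        rw [show (2:Int) * (2 ^ v2 q.toNat * s) = 2 ^ (v2 q.toNat + 1) * s by ring]
        simpa using hrec
      have := loopA target s node
          (specV (node - 2 ^ v2 q.toNat * s) target (2 ^ (v2 q.toNat + 1) * s)) q.toNat
          hnt hs hm (v2 q.toNat) 0 f' (f' + 1) (by omega) (by omega) (by omega)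
          hrec2 (by omega)
      simp only [pow_zero, one_mul] at this
      rw [this, specV_step hm hnt hs]

theorem scanB (target s0 node : Int) (m : Nat)
    (hnt : node - target = (m:Int) * s0) (hs : 1 ≤ s0) (hm : m ≠ 0) :
    ∀ j i fuel, i + j = v2 m → v2 m < i + fuel →
    dfsBScan fuel node target s0 (2 ^ i) =
      some (node - 2 ^ v2 m * s0, 2 * 2 ^ v2 m * s0) := by
  intro j
  induction j with
  | zero =>
    intro i fuel hij hif
    have hi : i = v2 m := by omega
    subst hi
    obtain ⟨fu, rfl⟩ : ∃ fu, fuel = fu + 1 := ⟨fuel - 1, by omega⟩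
    have hpow : (2:Nat) ^ v2 m ≤ m := v2_le hm
    have hpi : (2:Int) ^ v2 m ≤ (m:Int) := by exact_mod_cast hpow
    have hge : ¬(node - 2 ^ v2 m * s0 < target) := by push Not; nlinarith
    have hmod : PySem.Int.mod (target - (node - 2 ^ v2 m * s0)) (2 * 2 ^ v2 m * s0) = 0 := by
      rw [cand_mod hnt (by omega) (v2 m) (show (2:Int) * 2 ^ v2 m * s0 = 2 ^ (v2 m + 1) * s0 by ring)]
      exact v2_dvd_int hm
    simp only [dfsBScan]
    rw [if_neg hge, if_pos hmod]
  | succ j ih =>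
    intro i fuel hij hif
    have hiv : i < v2 m := by omega
    obtain ⟨fu, rfl⟩ : ∃ fu, fuel = fu + 1 := ⟨fuel - 1, by omega⟩
    have hpow : (2:Nat) ^ i ≤ m :=
      le_trans (Nat.pow_le_pow_right (by norm_num) (by omega)) (v2_le hm)
    have hpi : (2:Int) ^ i ≤ (m:Int) := by exact_mod_cast hpow
    have hge : ¬(node - 2 ^ i * s0 < target) := by push Not; nlinarith
    have hmod : PySem.Int.mod (target - (node - 2 ^ i * s0)) (2 * 2 ^ i * s0) ≠ 0 := by
      rw [ne_eq, cand_mod hnt (by omega) i (show (2:Int) * 2 ^ i * s0 = 2 ^ (i + 1) * s0 by ring)]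
      exact v2_not_dvd hm hiv
    simp only [dfsBScan]
    rw [if_neg hge, if_neg hmod, show (2:Int) * 2 ^ i = 2 ^ (i + 1) by ring]
    exact ih (i + 1) fu (by omega) (by omega)

theorem dfsBF_eq : ∀ k f (acc node target s : Int), k + 1 ≤ f → k ≤ 63 → 1 ≤ target → 1 ≤ s →
    target ≤ node → s ∣ (node - target) → node - target < 2 ^ k * s →
    dfsBF f acc node target s = acc + specV node target s := by
  intro k
  induction k with
  | zero =>
    intro f acc node target s h1 h63 ht hs hge hdvd hb
    obtain ⟨q, hq⟩ := hdvd
    have hq0 : q = 0 := by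
      by_contra hne
      rcases lt_or_gt_of_ne hne with hlt | hgt
      · nlinarith
      · nlinarith [hb, hq, hs]
    rw [hq0, mul_zero] at hq
    have he : node = target := by omega
    subst he
    obtain ⟨f', rfl⟩ : ∃ f', f = f' + 1 := ⟨f - 1, by omega⟩
    rw [specV_of_le le_rfl]
    simp [dfsBF]
  | succ k ihk =>
    intro f acc node target s h1 h63 ht hs hge hdvd hb
    by_cases he : node = target
    · subst he
      obtain ⟨f', rfl⟩ : ∃ f', f = f' + 1 := ⟨f - 1, by omega⟩
      rw [specV_of_le le_rfl]
      simp [dfsBF]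
    · have hlt : target < node := lt_of_le_of_ne hge (Ne.symm he)
      obtain ⟨q, hq⟩ := hdvd
      have hq1 : 1 ≤ q := by nlinarith
      have hnt : node - target = (q.toNat : Int) * s := by
        rw [Int.toNat_of_nonneg (by omega : (0:Int) ≤ q)]; linarith [hq]
      have hm : q.toNat ≠ 0 := by omega
      have hmb : q.toNat < 2 ^ (k + 1) := by
        have hbp : ((2:Int)) ^ (k + 1) = ((2 ^ (k + 1) : Nat) : Int) := by push_cast; ring
        have hqs : q * s < 2 ^ (k + 1) * s := by linarith [hq, hb]
        have hqlt : q < 2 ^ (k + 1) := lt_of_mul_lt_mul_right hqs (by omega)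
        omega
      have hv : v2 q.toNat < k + 1 := by
        have ha := v2_le hm
        have hb' : 2 ^ v2 q.toNat < 2 ^ (k + 1) := lt_of_le_of_lt ha hmb
        exact (Nat.pow_lt_pow_iff_right (by norm_num)).mp hb'
      have hcnt := child_inv hm hnt
      have hone : (1:Int) ≤ 2 ^ (v2 q.toNat + 1) := one_le_pow₀ (by norm_num)
      have hs' : (1:Int) ≤ 2 ^ (v2 q.toNat + 1) * s := by nlinarith
      have hmc0 : (0:Int) ≤ (mchild q.toNat : Int) := Int.natCast_nonneg _
      have hge' : target ≤ node - 2 ^ v2 q.toNat * s := by nlinarith [hcnt]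
      have hdvd' : (2 ^ (v2 q.toNat + 1) * s) ∣ (node - 2 ^ v2 q.toNat * s - target) :=
        ⟨(mchild q.toNat : Int), by rw [hcnt]; ring⟩
      have hb' : node - 2 ^ v2 q.toNat * s - target < 2 ^ k * (2 ^ (v2 q.toNat + 1) * s) := by
        have hmb' := mchild_bound hm hmb
        have hcast : ((mchild q.toNat : Int)) < 2 ^ k := by exact_mod_cast hmb'
        rw [hcnt]
        nlinarith
      obtain ⟨f', rfl⟩ : ∃ f', f = f' + 1 := ⟨f - 1, by omega⟩
      have hscan : dfsBScan 64 node target s 1 =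
          some (node - 2 ^ v2 q.toNat * s, 2 * 2 ^ v2 q.toNat * s) := by
        have := scanB target s node q.toNat hnt hs hm (v2 q.toNat) 0 64 (by omega) (by omega)
        simpa using this
      simp only [dfsBF]
      rw [if_neg he, hscan]
      have e2 : 2 * 2 ^ v2 q.toNat * s = 2 ^ (v2 q.toNat + 1) * s := by ring
      rw [e2]
      dsimp only
      have := ihk f' (acc + node) (node - 2 ^ v2 q.toNat * s) target
        (2 ^ (v2 q.toNat + 1) * s) (by omega) (by omega) ht hs' hge' hdvd' hb'
      rw [this, specV_step hm hnt hs]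
      ring

-- ===== VERDICT (by name: the statement is the Claim_ definition above) =====
theorem dfs_spec : Claim_equal_dfs := by
  intro node target shift hdom hpre
  simp only [Dom_dfs, pvDomInt, Bool.and_eq_true, decide_eq_true_eq] at hdom
  unfold Spec_dfs dfs dfs_alt
  by_cases hg : node < target ∨ PySem.Int.mod (target - node) shift ≠ 0
  · rw [show (64:Nat) = 63 + 1 from rfl]
    simp only [dfsAF]
    rw [if_pos hg, if_pos hg]
  · rw [not_or, not_not] at hg
    obtain ⟨hnlt, hmod⟩ := hg
    rw [if_neg (by rw [not_or, not_not]; exact ⟨hnlt, hmod⟩)]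
    rcases hpre with h1 | h2 | h3 | h4
    · exact absurd h1 hnlt
    · exact absurd hmod h2.2
    · obtain ⟨-, he⟩ := h3
      rw [show (64:Nat) = 63 + 1 from rfl, he, dfsAF_at_target]
      simp [dfsBF]
    · obtain ⟨hs, ht, hlt, -⟩ := h4
      have hdvd : shift ∣ node - target := by
        obtain ⟨c, hc⟩ := (PySem.Int.mod_eq_zero_iff_dvd _ _).mp hmod
        exact ⟨-c, by rw [mul_neg]; linarith [hc]⟩
      have hb : node - target < 2 ^ 33 * shift := by
        have h33 : (2:Int) ^ 33 = 8589934592 := by norm_num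
        rw [h33]
        nlinarith [hdom.1.1, hdom.1.2.1, hdom.1.2.2, hdom.2]
      rw [dfsAF_eq 33 64 node target shift (by norm_num) ht hs (le_of_lt hlt) hdvd hb,
        dfsBF_eq 33 64 0 node target shift (by norm_num) (by norm_num) ht hs
          (le_of_lt hlt) hdvd hb]
      ring
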